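-- pv_equiv track=rewrite | github.com/zach-karlovich/modernbert-ner-ablation | scripts/conll2003_sliding_window.py | flatten_doc
-- ===== SOURCE A (Python) =====
-- def flatten_doc(doc: list[list[tuple[str, str]]]):
--     words: list[str] = []
--     tags: list[str] = []
--     for sent in doc:
--         for w, t in sent:
--             words.append(w)
--             tags.append(t)
--     return words, tags
-- ===== SOURCE B (Python) =====
-- def flatten_doc(doc: list[list[tuple[str, str]]]):
--     flat = [p for sent in doc for p in sent]
--     if not flat:
--         return [], []
--     words, tags = zip(*flat)
--     return list(words), list(tags)
-- ===== Notes on version B (the rewrite author's own statement) =====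
-- stated objective: idiomatic
-- what changed: B flattens the nested list into one list of pairs and then transposes it columnwise (zip(*flat)) instead of A's two interleaved appends inside nested loops.
import Mathlib
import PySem

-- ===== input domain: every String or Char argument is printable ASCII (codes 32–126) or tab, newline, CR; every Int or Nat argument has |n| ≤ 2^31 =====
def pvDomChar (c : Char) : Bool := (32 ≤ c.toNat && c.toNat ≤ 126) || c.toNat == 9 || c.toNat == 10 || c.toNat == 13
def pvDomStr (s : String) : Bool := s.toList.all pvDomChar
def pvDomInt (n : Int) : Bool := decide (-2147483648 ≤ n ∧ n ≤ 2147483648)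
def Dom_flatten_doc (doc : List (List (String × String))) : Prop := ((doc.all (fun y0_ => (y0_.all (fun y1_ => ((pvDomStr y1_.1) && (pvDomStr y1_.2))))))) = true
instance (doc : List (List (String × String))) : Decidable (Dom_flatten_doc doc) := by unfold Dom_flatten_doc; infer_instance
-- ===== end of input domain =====

-- B flattens to one list of pairs and transposes it columnwise instead of A's interleaved appends (idiomatic decomposition; return value proved equal).

-- ===== PORT A =====
-- nested loops appending to the two accumulators words and tags
def flatten_doc (doc : List (List (String × String))) : List String × List String :=
  doc.foldl
    (fun acc sent =>
      sent.foldl (fun a p => (a.1 ++ [p.1], a.2 ++ [p.2])) acc)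
    ([], [])

-- ===== PORT B =====
-- flat = [p for sent in doc for p in sent]; empty guard; zip(*flat) transpose
def flatten_doc_alt (doc : List (List (String × String))) : List String × List String :=
  let flat := doc.flatMap (fun sent => sent)
  if flat = [] then ([], [])
  else (flat.map Prod.fst, flat.map Prod.snd)

-- ===== PRECONDITION & SPEC =====
def Spec_flatten_doc (doc : List (List (String × String))) (out : List String × List String) : Prop := out = flatten_doc_alt doc
instance (doc : List (List (String × String))) (out : List String × List String) : Decidable (Spec_flatten_doc doc out) := by unfold Spec_flatten_doc; infer_instance

-- ===== CLAIM (what is proved, stated in full; the proofs are below) =====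
def Claim_equal_flatten_doc : Prop := ∀ (doc : List (List (String × String))), Dom_flatten_doc doc → Spec_flatten_doc doc (flatten_doc doc)

-- ===== LEMMAS AND PROOFS =====

-- inner loop invariant: one sentence appends its columns to the accumulator
theorem flatten_inner (sent : List (String × String)) (acc : List String × List String) :
    sent.foldl (fun a p => (a.1 ++ [p.1], a.2 ++ [p.2])) acc
      = (acc.1 ++ sent.map Prod.fst, acc.2 ++ sent.map Prod.snd) := by
  induction sent generalizing acc with
  | nil => simp
  | cons p rest ih => simp [List.foldl, ih]

-- outer loop invariant
theorem flatten_outer (doc : List (List (String × String))) (acc : List String × List String) :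
    doc.foldl (fun acc sent => sent.foldl (fun a p => (a.1 ++ [p.1], a.2 ++ [p.2])) acc) acc
      = (acc.1 ++ (doc.flatMap (fun s => s)).map Prod.fst,
         acc.2 ++ (doc.flatMap (fun s => s)).map Prod.snd) := by
  induction doc generalizing acc with
  | nil => simp
  | cons sent rest ih =>
      rw [List.foldl_cons, flatten_inner, ih]
      simp

-- ===== VERDICT (by name: the statement is the Claim_ definition above) =====
theorem flatten_doc_spec : Claim_equal_flatten_doc := by
  intro doc _
  unfold Spec_flatten_doc flatten_doc flatten_doc_alt
  rw [flatten_outer]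
  by_cases h : doc.flatMap (fun s => s) = [] <;> simp [h]
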